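-- pv_equiv track=rewrite | github.com/maninka123/Tennis-tour-dashboard | data/wta/tournaments/inspect_brisbane_results.py | round_labels
-- ===== SOURCE A (Python) =====
-- def round_labels(draw_size: int, round_ids):
--     if draw_size >= 128:
--         labels = ["R128", "R64", "R32", "R16", "QF", "SF", "F"]
--     elif draw_size >= 64 or draw_size >= 48:
--         labels = ["R64", "R32", "R16", "QF", "SF", "F"]
--     elif draw_size >= 32:
--         labels = ["R32", "R16", "QF", "SF", "F"]
--     elif draw_size >= 16:
--         labels = ["R16", "QF", "SF", "F"]
--     else:
--         labels = ["QF", "SF", "F"]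
--
--     ids = sorted({rid for rid in round_ids if rid is not None}, reverse=True)
--     mapping = {}
--     for idx, rid in enumerate(ids):
--         if idx < len(labels):
--             mapping[rid] = labels[idx]
--     return mapping
-- ===== SOURCE B (Python) =====
-- LABELS = ["R128", "R64", "R32", "R16", "QF", "SF", "F"]
-- THRESHOLDS = [(0, 128), (1, 48), (2, 32), (3, 16)]
--
--
-- def round_labels(draw_size: int, round_ids):
--     labels = LABELS[4:]
--     for start, threshold in THRESHOLDS:
--         if draw_size >= threshold:
--             labels = LABELS[start:]
--             break
--     pool = {rid for rid in round_ids if rid is not None}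
--     mapping = {}
--     for label in labels:
--         if not pool:
--             break
--         best = max(pool)
--         pool.remove(best)
--         mapping[best] = label
--     return mapping
-- ===== Notes on version B (the rewrite author's own statement) =====
-- stated objective: alternative
-- what changed: Replaces the full reverse-sort of the distinct ids plus index-guarded dict fill by a table-driven label selection and a repeated-max partial selection: it pops max(pool) once per label and zips as it goes, never sorting the whole id set.
import Mathlib
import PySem

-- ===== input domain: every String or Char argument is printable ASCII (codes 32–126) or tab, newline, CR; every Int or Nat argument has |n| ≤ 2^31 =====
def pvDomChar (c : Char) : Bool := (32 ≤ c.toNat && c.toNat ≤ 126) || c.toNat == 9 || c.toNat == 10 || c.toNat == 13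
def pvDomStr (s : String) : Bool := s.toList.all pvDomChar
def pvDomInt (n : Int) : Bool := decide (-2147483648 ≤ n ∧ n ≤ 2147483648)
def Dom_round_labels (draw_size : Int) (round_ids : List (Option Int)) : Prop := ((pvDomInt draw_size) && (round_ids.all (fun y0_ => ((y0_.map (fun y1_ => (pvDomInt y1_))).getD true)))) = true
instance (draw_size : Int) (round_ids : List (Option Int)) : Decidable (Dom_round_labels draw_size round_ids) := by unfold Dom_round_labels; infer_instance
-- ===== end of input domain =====

-- B replaces the reverse-sort + index-guarded dict fill by a table-driven label choice and a
-- repeated-max partial selection (alternative algorithm; not measured faster).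

-- ===== PORT A =====
def round_labels (draw_size : Int) (round_ids : List (Option Int)) : List (Int × String) :=
  let labels : List String :=
    if draw_size ≥ 128 then ["R128", "R64", "R32", "R16", "QF", "SF", "F"]
    else if draw_size ≥ 64 ∨ draw_size ≥ 48 then ["R64", "R32", "R16", "QF", "SF", "F"]
    else if draw_size ≥ 32 then ["R32", "R16", "QF", "SF", "F"]
    else if draw_size ≥ 16 then ["R16", "QF", "SF", "F"]
    else ["QF", "SF", "F"]
  let ids : List Int :=
    PySem.List.sorted (PySem.Set.ofList (round_ids.filterMap id)) (fun x => x) true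
  let mapping : PySem.Dict Int String :=
    (PySem.List.enumerate ids 0).foldl
      (fun m p =>
        if p.1 < (labels.length : Int) then
          m.insert p.2 (PySem.List.pyGetD labels p.1 "")   -- labels[idx]: guard gives 0 ≤ idx < len, exact
        else m)
      PySem.Dict.empty
  mapping.items

-- ===== PORT B =====
def pvLABELS : List String := ["R128", "R64", "R32", "R16", "QF", "SF", "F"]
def pvTHRESHOLDS : List (Int × Int) := [(0, 128), (1, 48), (2, 32), (3, 16)]

-- the 'for start, threshold in THRESHOLDS: … break' loop; fall-through = default LABELS[4:]
def pvPickLabels : List (Int × Int) → Int → List String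
  | [], _ => PySem.List.slice pvLABELS (some 4) none
  | (start, t) :: rest, d =>
      if d ≥ t then PySem.List.slice pvLABELS (some start) none else pvPickLabels rest d

-- the 'for label in labels: if not pool: break; best = max(pool); pool.remove(best); mapping[best] = label' loop
def pvExtract : List String → List Int → PySem.Dict Int String → PySem.Dict Int String
  | [], _, m => m
  | _ :: _, [], m => m
  | label :: labs, p :: ps, m =>
      match PySem.List.max? (p :: ps) (fun x => x) with
      | none => m          -- unreachable: pool is nonempty
      | some best =>
          match PySem.Set.remove? (p :: ps) best with
          | none => m      -- unreachable: best = max(pool) ∈ pool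
          | some pool' => pvExtract labs pool' (m.insert best label)

def round_labels_alt (draw_size : Int) (round_ids : List (Option Int)) : List (Int × String) :=
  (pvExtract (pvPickLabels pvTHRESHOLDS draw_size)
    (PySem.Set.ofList (round_ids.filterMap id)) PySem.Dict.empty).items

-- ===== PRECONDITION & SPEC =====
def Spec_round_labels (draw_size : Int) (round_ids : List (Option Int)) (out : List (Int × String)) : Prop := out = round_labels_alt draw_size round_ids
instance (draw_size : Int) (round_ids : List (Option Int)) (out : List (Int × String)) : Decidable (Spec_round_labels draw_size round_ids out) := by unfold Spec_round_labels; infer_instance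

-- ===== CLAIM (what is proved, stated in full; the proofs are below) =====
def Claim_equal_round_labels : Prop := ∀ (draw_size : Int) (round_ids : List (Option Int)), Dom_round_labels draw_size round_ids → Spec_round_labels draw_size round_ids (round_labels draw_size round_ids)

-- ===== LEMMAS AND PROOFS =====

theorem pvLabels_eq (d : Int) :
    pvPickLabels pvTHRESHOLDS d =
      (if d ≥ 128 then ["R128", "R64", "R32", "R16", "QF", "SF", "F"]
       else if d ≥ 64 ∨ d ≥ 48 then ["R64", "R32", "R16", "QF", "SF", "F"]
       else if d ≥ 32 then ["R32", "R16", "QF", "SF", "F"]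
       else if d ≥ 16 then ["R16", "QF", "SF", "F"]
       else ["QF", "SF", "F"]) := by
  simp only [pvTHRESHOLDS, pvPickLabels, pvLABELS]
  split_ifs <;> first | rfl | omega

theorem pvFoldA (labels : List String) (ids : List Int) (s : Nat) (m : PySem.Dict Int String)
    (hn : ids.Nodup) (hfresh : ∀ i ∈ ids, m.contains i = false) :
    ((PySem.List.enumerate ids (s : Int)).foldl
      (fun m p =>
        if p.1 < (labels.length : Int) then m.insert p.2 (PySem.List.pyGetD labels p.1 "") else m)
      m).items = m.items ++ List.zip ids (labels.drop s) := by
  induction ids generalizing s m with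
  | nil => simp [PySem.List.enumerate_nil]
  | cons i rest ih =>
    rw [PySem.List.enumerate_cons]
    simp only [List.foldl_cons]
    have hi : m.contains i = false := hfresh i (List.mem_cons_self ..)
    have hrn : rest.Nodup := hn.of_cons
    have hir : i ∉ rest := (List.nodup_cons.mp hn).1
    by_cases hs : s < labels.length
    · have hguard : ((s : Int)) < (labels.length : Int) := by exact_mod_cast hs
      rw [if_pos hguard]
      have hcast : ((s : Int)) + 1 = ((s + 1 : Nat) : Int) := by push_cast; ring
      rw [hcast, ih (s + 1) _ hrn ?_]
      · rw [PySem.Dict.items_insert_of_not_contains _ _ hi]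
        rw [List.drop_eq_getElem_cons hs]
        have : PySem.List.pyGetD labels (s : Int) "" = labels[s] := by
          rw [PySem.List.pyGetD_natCast]
          simp [List.getD, hs]
        rw [this, List.zip_cons_cons, List.append_assoc]
        rfl
      · intro j hj
        rw [PySem.Dict.contains_insert]
        have : j ≠ i := fun h => hir (h ▸ hj)
        simp [this, hfresh j (List.mem_cons_of_mem _ hj)]
    · have hguard : ¬ ((s : Int)) < (labels.length : Int) := by
        omega
      rw [if_neg hguard]
      have hcast : ((s : Int)) + 1 = ((s + 1 : Nat) : Int) := by push_cast; ring
      rw [hcast, ih (s + 1) m hrn (fun j hj => hfresh j (List.mem_cons_of_mem _ hj))]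
      have h1 : labels.drop s = [] := List.drop_eq_nil_of_le (by omega)
      have h2 : labels.drop (s + 1) = [] := List.drop_eq_nil_of_le (by omega)
      simp [h1, h2]

theorem pvPairwise_gt_of_sorted_rev (pool : List Int) (hn : pool.Nodup) :
    (PySem.List.sorted pool (fun x => x) true).Pairwise (fun a b => b < a) := by
  have hperm : (PySem.List.sorted pool (fun x => x) true).Perm pool :=
    PySem.List.sorted_perm ..
  have hnd : (PySem.List.sorted pool (fun x => x) true).Nodup := hperm.nodup_iff.mpr hn
  have hge : (PySem.List.sorted pool (fun x => x) true).Pairwise (fun a b => b ≤ a) :=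
    PySem.List.sorted_pairwise_rev ..
  have := hnd.and hge
  exact this.imp (by intro a b ⟨hne, hle⟩; omega)

theorem pvExtractB (labels : List String) (pool : List Int) (m : PySem.Dict Int String)
    (hn : pool.Nodup) (hfresh : ∀ i ∈ pool, m.contains i = false) :
    (pvExtract labels pool m).items =
      m.items ++ List.zip (PySem.List.sorted pool (fun x => x) true) labels := by
  induction labels generalizing pool m with
  | nil => simp [pvExtract]
  | cons label labs ih =>
    match pool, hn, hfresh with
    | [], _, _ => simp [pvExtract, PySem.List.sorted_eq_nil_iff]
    | p :: ps, hn, hfresh =>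
      have hperm : (PySem.List.sorted (p :: ps) (fun x => x) true).Perm (p :: ps) :=
        PySem.List.sorted_perm ..
      obtain ⟨h, t, hsd⟩ : ∃ h t, PySem.List.sorted (p :: ps) (fun x => x) true = h :: t := by
        cases hl : PySem.List.sorted (p :: ps) (fun x => x) true with
        | nil => exact absurd (hl ▸ hperm) (by simp)
        | cons a b => exact ⟨a, b, rfl⟩
      have hhm : h ∈ p :: ps := hperm.mem_iff.mp (hsd ▸ List.mem_cons_self ..)
      have hmax : PySem.List.max? (p :: ps) (fun x => x) = some h := by
        cases hm : PySem.List.max? (p :: ps) (fun x => x) with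
        | none => exact absurd ((PySem.List.max?_eq_none_iff _ _).mp hm) (by simp)
        | some m0 =>
          have hm0mem : m0 ∈ p :: ps := PySem.List.max?_mem hm
          have h1 : m0 ≤ h := PySem.List.key_head_sorted_rev_ge _ _ hsd m0 hm0mem
          have h2 : h ≤ m0 := PySem.List.max?_isMax hm h hhm
          rw [le_antisymm h1 h2]
      rw [pvExtract, hmax]
      simp only [PySem.Set.remove?_of_mem hhm]
      have hsdnd : (h :: t).Nodup := hsd ▸ hperm.nodup_iff.mpr hn
      have hdnd : (PySem.Set.discard (p :: ps) h).Nodup := PySem.Set.nodup_discard _ _ hn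
      have hperm' : t.Perm (PySem.Set.discard (p :: ps) h) := by
        rw [List.perm_ext_iff_of_nodup hsdnd.of_cons hdnd]
        intro a
        rw [PySem.Set.mem_discard]
        constructor
        · intro ha
          have hane : a ≠ h := fun he => (List.nodup_cons.mp hsdnd).1 (he ▸ ha)
          exact ⟨hperm.mem_iff.mp (hsd ▸ List.mem_cons_of_mem _ ha), hane⟩
        · rintro ⟨hap, hane⟩
          have : a ∈ h :: t := hsd ▸ hperm.mem_iff.mpr hap
          exact (List.mem_cons.mp this).resolve_left hane
      have hgt : (PySem.List.sorted (p :: ps) (fun x => x) true).Pairwise (fun a b => b < a) :=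
        pvPairwise_gt_of_sorted_rev _ hn
      have hsort' : PySem.List.sorted (PySem.Set.discard (p :: ps) h) (fun x => x) true = t :=
        PySem.List.sorted_rev_eq_of_perm_of_pairwise_gt _ _ _ hperm' (by
          have := hsd ▸ hgt
          exact this.of_cons)
      have hhf : m.contains h = false := hfresh h hhm
      rw [ih (PySem.Set.discard (p :: ps) h) _ hdnd ?_]
      · rw [hsort', PySem.Dict.items_insert_of_not_contains _ _ hhf, hsd,
          List.zip_cons_cons, List.append_assoc]
        rfl
      · intro j hj
        obtain ⟨hjmem, hjne⟩ := (PySem.Set.mem_discard _ _ _).mp hj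
        rw [PySem.Dict.contains_insert]
        simp [hjne, hfresh j hjmem]

-- ===== VERDICT (by name: the statement is the Claim_ definition above) =====
theorem round_labels_spec : Claim_equal_round_labels := by
  intro draw_size round_ids _
  unfold Spec_round_labels round_labels round_labels_alt
  rw [pvLabels_eq]
  have hn : (PySem.Set.ofList (round_ids.filterMap id) : List Int).Nodup :=
    PySem.Set.nodup_ofList _
  have hsn : (PySem.List.sorted (PySem.Set.ofList (round_ids.filterMap id)) (fun x => x) true).Nodup :=
    (PySem.List.sorted_perm ..).nodup_iff.mpr hn
  have h0 : ((0 : Int)) = ((0 : Nat) : Int) := rfl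
  rw [h0, pvFoldA _ _ 0 _ hsn (fun i _ => PySem.Dict.contains_empty ..),
    pvExtractB _ _ _ hn (fun i _ => PySem.Dict.contains_empty ..)]
  simp
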